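-- pv_equiv track=rewrite | github.com/alain-nambi/travelagency | AmadeusDecoder/utilities/NotificationParser.py | get_pnr_number
-- ===== SOURCE A (Python) =====
-- def get_pnr_number(file_content):
--     pnr_number = ''
--     if len(file_content) == 0:
--         # pnr is not issued
--         1
--     else:
--         for i in range(len(file_content)):
--             if file_content[i].startswith('Dossier N'):
--                 if len(file_content[i-1]) == 6:
--                     pnr_number = file_content[i-1]
--                 else:
--                     pnr_number = file_content[i-1]
--
--     return pnr_number
-- ===== SOURCE B (Python) =====
-- def get_pnr_number(file_content):
--     # Scan indices from the end and return at the first (i.e. last-in-file)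
--     # 'Dossier N' line; file_content[i-1] wraps to the last line when i == 0.
--     for i in reversed(range(len(file_content))):
--         if file_content[i].startswith('Dossier N'):
--             return file_content[i - 1]
--     return ''
-- ===== Notes on version B (the rewrite author's own statement) =====
-- stated objective: simpler
-- what changed: B replaces A's full forward sweep that keeps overwriting an accumulator (and its dead len==6 branch) by a reverse-index scan that returns file_content[i-1] at the first match from the end, preserving the i-1 wraparound.
import Mathlib
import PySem

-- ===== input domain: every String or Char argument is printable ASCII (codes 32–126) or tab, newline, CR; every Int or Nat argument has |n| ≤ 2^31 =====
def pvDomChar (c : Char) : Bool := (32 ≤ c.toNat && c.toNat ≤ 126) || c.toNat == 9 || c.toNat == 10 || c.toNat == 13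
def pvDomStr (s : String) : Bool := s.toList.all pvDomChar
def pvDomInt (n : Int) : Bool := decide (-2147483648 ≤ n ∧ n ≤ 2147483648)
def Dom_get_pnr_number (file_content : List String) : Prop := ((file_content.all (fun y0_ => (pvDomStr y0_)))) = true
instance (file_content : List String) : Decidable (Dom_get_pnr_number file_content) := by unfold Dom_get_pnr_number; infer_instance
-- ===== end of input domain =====

-- B replaces A's full forward accumulator sweep (with its dead len==6 branch) by a
-- reverse-index scan with early return, preserving the i-1 wraparound; objective: simpler.

-- ===== PORT A =====
-- file_content[i] and file_content[i-1] are always in range inside the loop (the loop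
-- only runs when the list is nonempty, and i-1 = -1 wraps), so pyGetD with default "" is exact.
def get_pnr_number (file_content : List String) : String :=
  if file_content.length = 0 then
    ""  -- pnr_number stays ''
  else
    (PySem.List.pyRange 0 (file_content.length : Int)).foldl
      (fun pnr i =>
        if PySem.Str.startswith (PySem.List.pyGetD file_content i "") "Dossier N" then
          PySem.List.pyGetD file_content (i - 1) ""
        else pnr) ""

-- ===== PORT B =====
-- pnrGo fc k scans indices k-1, k-2, …, 0 (i.e. reversed(range(k))) and returns at the first match.
def pnrGo (file_content : List String) : Nat → String
  | 0 => ""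
  | k + 1 =>
    if PySem.Str.startswith (PySem.List.pyGetD file_content (k : Int) "") "Dossier N" then
      PySem.List.pyGetD file_content ((k : Int) - 1) ""
    else pnrGo file_content k

def get_pnr_number_alt (file_content : List String) : String :=
  pnrGo file_content file_content.length

-- ===== PRECONDITION & SPEC =====
def Spec_get_pnr_number (file_content : List String) (out : String) : Prop := out = get_pnr_number_alt file_content
instance (file_content : List String) (out : String) : Decidable (Spec_get_pnr_number file_content out) := by unfold Spec_get_pnr_number; infer_instance

-- ===== CLAIM (what is proved, stated in full; the proofs are below) =====
def Claim_equal_get_pnr_number : Prop := ∀ (file_content : List String), Dom_get_pnr_number file_content → Spec_get_pnr_number file_content (get_pnr_number file_content)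

-- ===== LEMMAS AND PROOFS =====

-- A's fold over range(m) computes the same value as B's reverse scan of the first m indices.
theorem pnr_foldl_eq_go (file_content : List String) (m : Nat) :
    (PySem.List.pyRange 0 (m : Int)).foldl
      (fun pnr i =>
        if PySem.Str.startswith (PySem.List.pyGetD file_content i "") "Dossier N" then
          PySem.List.pyGetD file_content (i - 1) ""
        else pnr) ""
    = pnrGo file_content m := by
  induction m with
  | zero => simp [PySem.List.pyRange, pnrGo]
  | succ k ih =>
    have h : ((k + 1 : Nat) : Int) = (k : Int) + 1 := by push_cast; ring
    rw [h, PySem.List.pyRange_one_succ_right (by exact_mod_cast Nat.zero_le k),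
        List.foldl_append, ih]
    simp [pnrGo]

-- ===== VERDICT (by name: the statement is the Claim_ definition above) =====
theorem get_pnr_number_spec : Claim_equal_get_pnr_number := by
  intro file_content _
  unfold Spec_get_pnr_number get_pnr_number get_pnr_number_alt
  by_cases h : file_content.length = 0
  · simp [List.length_eq_zero_iff.mp h, pnrGo]
  · simp only [h, if_false]
    exact pnr_foldl_eq_go file_content file_content.length
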